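-- pv_equiv track=rewrite | github.com/valenciaaaalim/whatsapp_chat_1 | web-app/backend/app/routers/risk_assessment.py | transform_messages
-- ===== SOURCE A (Python) =====
-- from typing import Optional, List, Dict, Any
--
-- def transform_messages(raw_messages: List[Dict[str, Any]]) -> List[Dict[str, Any]]:
--     """
--     Transform messages from {Name, Message} format to frontend-expected format.
--     The first name in the conversation is the "contact" (RECEIVED),
--     the second unique name is the "user" (SENT).
--     """
--     if not raw_messages:
--         return []
--
--     # Identify the two participants
--     names_in_order = []
--     for msg in raw_messages:
--         name = msg.get("Name", "")
--         if name and name not in names_in_order: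
--             names_in_order.append(name)
--             if len(names_in_order) == 2:
--                 break
--
--     # First unique name is contact, second is user
--     contact_name = names_in_order[0] if len(names_in_order) > 0 else "Contact"
--     user_name = names_in_order[1] if len(names_in_order) > 1 else "User"
--
--     transformed = []
--     for idx, msg in enumerate(raw_messages):
--         name = msg.get("Name", "")
--         direction = "RECEIVED" if name == contact_name else "SENT"
--         transformed.append({
--             "id": f"msg-{idx}",
--             "name": name,
--             "text": msg.get("Message", ""),
--             "direction": direction
--         })
--
--     return transformed
-- ===== SOURCE B (Python) =====
-- def transform_messages(raw_messages):
--     if not raw_messages: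
--         return []
--     transformed = []
--     contact_name = None
--     for idx, msg in enumerate(raw_messages):
--         name = msg.get("Name", "")
--         if contact_name is None and name:
--             contact_name = name
--         transformed.append({
--             "id": f"msg-{idx}",
--             "name": name,
--             "text": msg.get("Message", ""),
--             "direction": "RECEIVED" if name == contact_name else "SENT",
--         })
--     return transformed
-- ===== Notes on version B (the rewrite author's own statement) =====
-- stated objective: simpler
-- what changed: Single enumerate pass carrying an Option contact_name (first truthy name seen so far) instead of A's separate participant-scan pass followed by a mapping pass; the unused user_name and the two-name list are dropped.
import Mathlib
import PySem

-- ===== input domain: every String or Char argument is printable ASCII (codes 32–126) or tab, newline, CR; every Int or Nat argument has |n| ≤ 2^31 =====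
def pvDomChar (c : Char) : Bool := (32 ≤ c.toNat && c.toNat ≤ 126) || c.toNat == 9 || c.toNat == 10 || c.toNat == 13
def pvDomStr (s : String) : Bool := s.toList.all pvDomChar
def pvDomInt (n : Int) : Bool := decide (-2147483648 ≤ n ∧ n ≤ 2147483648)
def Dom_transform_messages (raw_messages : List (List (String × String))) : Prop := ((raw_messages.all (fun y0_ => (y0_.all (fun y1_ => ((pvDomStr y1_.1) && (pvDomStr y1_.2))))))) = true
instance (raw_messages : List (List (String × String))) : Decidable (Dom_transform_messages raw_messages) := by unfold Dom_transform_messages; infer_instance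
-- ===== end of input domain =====

-- B is a single pass instead of A's participant-scan pass followed by a mapping pass (objective: simpler).

-- msg.get(k, "") on an association list (first match, like a Python dict)
def tmGet (msg : List (String × String)) (k : String) : String :=
  ((msg.find? (fun p => p.1 == k)).map (·.2)).getD ""

-- ===== PORT A =====
-- the participant scan: appends each new truthy name, stops at two
def tmNames : List (List (String × String)) → List String → List String
  | [], acc => acc
  | msg :: rest, acc =>
    let name := tmGet msg "Name"
    if name ≠ "" ∧ ¬ (name ∈ acc) then
      let acc' := acc ++ [name]
      if acc'.length = 2 then acc' else tmNames rest acc'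
    else tmNames rest acc

-- the mapping pass, with the contact name fixed
def tmRows (contact_name : String) : List (List (String × String)) → Int → List (List (String × String))
  | [], _ => []
  | msg :: rest, idx =>
    let name := tmGet msg "Name"
    let direction := if name = contact_name then "RECEIVED" else "SENT"
    [("id", "msg-" ++ PySem.Int.toStr idx), ("name", name),
     ("text", tmGet msg "Message"), ("direction", direction)] :: tmRows contact_name rest (idx + 1)

def transform_messages (raw_messages : List (List (String × String))) : List (List (String × String)) :=
  if raw_messages = [] then []
  else
    let names_in_order := tmNames raw_messages []
    let contact_name := match names_in_order with | [] => "Contact" | n :: _ => n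
    let _user_name := match names_in_order with | _ :: u :: _ => u | _ => "User"
    tmRows contact_name raw_messages 0

-- ===== PORT B =====
-- single pass: contact_name is None until the first truthy name is seen
def tmLoop : List (List (String × String)) → Int → Option String → List (List (String × String))
  | [], _, _ => []
  | msg :: rest, idx, contact =>
    let name := tmGet msg "Name"
    let contact' := if contact = none ∧ name ≠ "" then some name else contact
    [("id", "msg-" ++ PySem.Int.toStr idx), ("name", name),
     ("text", tmGet msg "Message"),
     ("direction", if some name = contact' then "RECEIVED" else "SENT")] :: tmLoop rest (idx + 1) contact'

def transform_messages_alt (raw_messages : List (List (String × String))) : List (List (String × String)) :=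
  if raw_messages = [] then [] else tmLoop raw_messages 0 none

-- ===== PRECONDITION & SPEC =====
def Spec_transform_messages (raw_messages : List (List (String × String))) (out : List (List (String × String))) : Prop := out = transform_messages_alt raw_messages
instance (raw_messages : List (List (String × String))) (out : List (List (String × String))) : Decidable (Spec_transform_messages raw_messages out) := by unfold Spec_transform_messages; infer_instance

-- ===== CLAIM (what is proved, stated in full; the proofs are below) =====
def Claim_equal_transform_messages : Prop := ∀ (raw_messages : List (List (String × String))), Dom_transform_messages raw_messages → Spec_transform_messages raw_messages (transform_messages raw_messages)

-- ===== LEMMAS AND PROOFS =====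

-- the first truthy "Name" in the list, if any
def tmFirst : List (List (String × String)) → Option String
  | [] => none
  | msg :: rest => let name := tmGet msg "Name"; if name ≠ "" then some name else tmFirst rest

-- once the accumulator is nonempty, its head survives the scan
lemma tmNames_head : ∀ (msgs : List (List (String × String))) (n : String) (acc : List String),
    (tmNames msgs (n :: acc)).head? = some n := by
  intro msgs
  induction msgs with
  | nil => intro n acc; simp [tmNames]
  | cons msg rest ih =>
    intro n acc
    simp only [tmNames]
    split
    · split
      · simp
      · exact ih n _
    · exact ih n acc

-- head of A's scan from the empty accumulator = first truthy name
lemma tmNames_head_nil : ∀ (msgs : List (List (String × String))),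
    (tmNames msgs []).head? = tmFirst msgs := by
  intro msgs
  induction msgs with
  | nil => simp [tmNames, tmFirst]
  | cons msg rest ih =>
    simp only [tmNames, tmFirst]
    by_cases h : tmGet msg "Name" = ""
    · simp [h, ih]
    · simp [h, tmNames_head]

-- once B's contact is set, B's loop is A's mapping pass with that contact
lemma tmLoop_some : ∀ (msgs : List (List (String × String))) (idx : Int) (c : String),
    tmLoop msgs idx (some c) = tmRows c msgs idx := by
  intro msgs
  induction msgs with
  | nil => intro idx c; simp [tmLoop, tmRows]
  | cons msg rest ih =>
    intro idx c
    simp [tmLoop, tmRows, ih]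

-- main invariant: B's loop with no contact yet = A's mapping pass with A's contact
lemma tmLoop_none : ∀ (msgs : List (List (String × String))),
    tmLoop msgs 0 none
      = tmRows (match tmFirst msgs with | none => "Contact" | some n => n) msgs 0 := by
  suffices h : ∀ (msgs : List (List (String × String))) (idx : Int),
      tmLoop msgs idx none
        = tmRows (match tmFirst msgs with | none => "Contact" | some n => n) msgs idx by
    intro msgs; exact h msgs 0
  intro msgs
  induction msgs with
  | nil => intro idx; simp [tmLoop, tmRows]
  | cons msg rest ih =>
    intro idx
    simp only [tmLoop, tmRows, tmFirst]
    by_cases h : tmGet msg "Name" = ""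
    · -- head name is empty: contact stays none; both rows are SENT
      have hc : (match tmFirst rest with | none => "Contact" | some n => n) ≠ "" := by
        cases hr : tmFirst rest with
        | none => decide
        | some n =>
          -- tmFirst only returns truthy names
          clear ih h idx
          induction rest with
          | nil => simp [tmFirst] at hr
          | cons m r ihr =>
            simp only [tmFirst] at hr
            split at hr
            · simp_all
            · exact ihr hr
      simp [h, ih, Ne.symm hc]
    · -- head name is truthy: it is the contact for both
      simp [h, tmLoop_some]

-- ===== VERDICT (by name: the statement is the Claim_ definition above) =====
theorem transform_messages_spec : Claim_equal_transform_messages := by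
  intro raw_messages _
  unfold Spec_transform_messages transform_messages transform_messages_alt
  by_cases h : raw_messages = []
  · simp [h]
  · simp only [if_neg h]
    rw [tmLoop_none]
    cases hn : tmNames raw_messages [] with
    | nil =>
      have := tmNames_head_nil raw_messages
      rw [hn] at this; simp at this
      rw [← this]
    | cons n t =>
      have := tmNames_head_nil raw_messages
      rw [hn] at this; simp at this
      rw [← this]
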